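-- pv_equiv track=rewrite | github.com/Bai1026/LLM_Persona | In_context_self_play/self_play.py | extract_conversation
-- ===== SOURCE A (Python) =====
-- def extract_conversation(messages):
--     system_message = None
--     conversation_list = []
--     last_user_message = None
--
--     last_user_index = None
--     for i, msg in enumerate(messages):
--         if msg.get("role") == "user":
--             last_user_index = i
--
--     for i, msg in enumerate(messages):
--         role = msg.get("role")
--         content = msg.get("content")
--
--         if role == "system":
--             system_message = content
--
--         elif role in ("user", "assistant"):
--             # pass the last user message
--             if role == "user" and i == last_user_index:
--                 last_user_message = content
--                 continue
--             conversation_list.append(msg)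
--
--     return system_message, conversation_list, last_user_message
-- ===== SOURCE B (Python) =====
-- def extract_conversation(messages):
--     # Single reverse pass: the first user message seen from the end is the last
--     # user message; the first system seen from the end is the last system message.
--     system_message = None
--     seen_system = False
--     conversation_rev = []
--     seen_user = False
--     last_user_message = None
--     for msg in reversed(messages):
--         role = msg.get("role")
--         if role == "system":
--             if not seen_system:
--                 system_message = msg.get("content")
--                 seen_system = True
--         elif role == "user":
--             if seen_user:
--                 conversation_rev.append(msg)
--             else:
--                 last_user_message = msg.get("content")
--                 seen_user = True
--         elif role == "assistant":
--             conversation_rev.append(msg)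
--     return system_message, conversation_rev[::-1], last_user_message
-- ===== Notes on version B (the rewrite author's own statement) =====
-- stated objective: alternative
-- what changed: Replaces A's two forward passes (precompute the last user index, then re-scan comparing every index against it) by a single backward pass: iterating over reversed(messages), the first user message seen is the last user message and the first system message seen is the last system message; the collected conversation is reversed once at the end.
import Mathlib
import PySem

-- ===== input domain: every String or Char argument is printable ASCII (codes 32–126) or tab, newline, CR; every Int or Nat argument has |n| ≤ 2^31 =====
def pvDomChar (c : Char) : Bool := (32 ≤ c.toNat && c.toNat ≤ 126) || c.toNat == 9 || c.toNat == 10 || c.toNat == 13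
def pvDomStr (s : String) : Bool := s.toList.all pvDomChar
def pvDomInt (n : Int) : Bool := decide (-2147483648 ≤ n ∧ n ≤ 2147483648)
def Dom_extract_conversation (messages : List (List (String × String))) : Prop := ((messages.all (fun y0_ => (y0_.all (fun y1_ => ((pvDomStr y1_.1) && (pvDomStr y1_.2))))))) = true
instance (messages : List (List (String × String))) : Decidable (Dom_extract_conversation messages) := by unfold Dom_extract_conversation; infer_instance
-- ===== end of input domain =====

-- B replaces A's two forward passes (index precomputation + indexed re-scan) by one
-- backward pass over reversed(messages); same return value, proved equivalent below.


-- msg.get(k): first-match lookup in the association list (shared dict helper)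
def dget (msg : List (String × String)) (k : String) : Option String :=
  (msg.find? (fun p => p.1 == k)).map (·.2)

-- ===== PORT A =====
def extract_conversation (messages : List (List (String × String))) :
    Option String × (List (List (String × String))) × Option String :=
  -- first pass: last_user_index
  let lui : Option Int :=
    (PySem.List.enumerate messages 0).foldl
      (fun acc p => if dget p.2 "role" = some "user" then some p.1 else acc) none
  -- second pass
  (PySem.List.enumerate messages 0).foldl
    (fun (st : Option String × (List (List (String × String))) × Option String) p =>
      let role := dget p.2 "role"
      let content := dget p.2 "content"
      if role = some "system" then (content, st.2.1, st.2.2)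
      else if role = some "user" ∨ role = some "assistant" then
        (if role = some "user" ∧ some p.1 = lui then (st.1, st.2.1, content)
         else (st.1, st.2.1 ++ [p.2], st.2.2))
      else st)
    (none, [], none)

-- ===== PORT B =====
def extract_conversation_alt (messages : List (List (String × String))) :
    Option String × (List (List (String × String))) × Option String :=
  let st :=
    messages.reverse.foldl
      (fun (st : Option String × Bool × (List (List (String × String))) × Bool × Option String) msg =>
        let (sys, seenSys, conv, seenUser, lu) := st
        let role := dget msg "role"
        if role = some "system" then
          (if seenSys then (sys, seenSys, conv, seenUser, lu)
           else (dget msg "content", true, conv, seenUser, lu))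
        else if role = some "user" then
          (if seenUser then (sys, seenSys, conv ++ [msg], seenUser, lu)
           else (sys, seenSys, conv, true, dget msg "content"))
        else if role = some "assistant" then (sys, seenSys, conv ++ [msg], seenUser, lu)
        else (sys, seenSys, conv, seenUser, lu))
      (none, false, [], false, none)
  (st.1, st.2.2.1.reverse, st.2.2.2.2)

-- ===== PRECONDITION & SPEC =====
def Spec_extract_conversation (messages : List (List (String × String))) (out : Option String × (List (List (String × String))) × Option String) : Prop := out = extract_conversation_alt messages
instance (messages : List (List (String × String))) (out : Option String × (List (List (String × String))) × Option String) : Decidable (Spec_extract_conversation messages out) := by unfold Spec_extract_conversation; infer_instance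

-- ===== CLAIM (what is proved, stated in full; the proofs are below) =====
def Claim_equal_extract_conversation : Prop := ∀ (messages : List (List (String × String))), Dom_extract_conversation messages → Spec_extract_conversation messages (extract_conversation messages)

-- ===== LEMMAS AND PROOFS =====

-- role tests, as Booleans
def isSys (m : List (String × String)) : Bool := dget m "role" == some "system"
def isUser (m : List (String × String)) : Bool := dget m "role" == some "user"
def isAsst (m : List (String × String)) : Bool := dget m "role" == some "assistant"
def isUA (m : List (String × String)) : Bool := isUser m || isAsst m
def contentOf (m : List (String × String)) : Option String := dget m "content"

-- last-system accumulator (a left fold) and its reverse/find? characterisation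
def lastSysUpd (s : Option String) : List (List (String × String)) → Option String
  | [] => s
  | m :: t => lastSysUpd (if isSys m then contentOf m else s) t

-- B's reverse-order conversation collector, parametrised by the seen_user flag
def convRev (su : Bool) : List (List (String × String)) → List (List (String × String))
  | [] => []
  | m :: t =>
    if isUser m then (if su then m :: convRev su t else convRev true t)
    else if isAsst m then m :: convRev su t
    else convRev su t

-- the common closed form both ports are proved equal to
def sysSpec (msgs : List (List (String × String))) : Option String :=
  (msgs.reverse.find? isSys).bind contentOf
def luSpec (msgs : List (List (String × String))) : Option String :=
  (msgs.reverse.find? isUser).bind contentOf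
def convSpec (msgs : List (List (String × String))) : List (List (String × String)) :=
  (convRev false msgs.reverse).reverse

theorem lastSysUpd_eq (l : List (List (String × String))) (s : Option String) :
    lastSysUpd s l = ((l.reverse.find? isSys).map contentOf).getD s := by
  induction l generalizing s with
  | nil => simp [lastSysUpd]
  | cons a t ih =>
    simp only [lastSysUpd, List.reverse_cons, List.find?_append, ih]
    cases h : t.reverse.find? isSys <;> by_cases ha : isSys a <;> simp [List.find?, ha, Option.or]

theorem convRev_true (l : List (List (String × String))) :
    convRev true l = l.filter isUA := by
  induction l with
  | nil => rfl
  | cons a t ih =>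
    by_cases hu : isUser a <;> by_cases hA : isAsst a <;>
      simp [convRev, isUA, hu, hA, ih]

-- A's first-pass fold function
def fL : Option Int → Int × List (String × String) → Option Int :=
  fun acc p => if dget p.2 "role" = some "user" then some p.1 else acc

-- A's second-pass fold function
def fA (lui : Option Int) :
    (Option String × (List (List (String × String))) × Option String) →
    Int × List (String × String) →
    (Option String × (List (List (String × String))) × Option String) :=
  fun st p =>
    let role := dget p.2 "role"
    let content := dget p.2 "content"
    if role = some "system" then (content, st.2.1, st.2.2)
    else if role = some "user" ∨ role = some "assistant" then
      (if role = some "user" ∧ some p.1 = lui then (st.1, st.2.1, content)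
       else (st.1, st.2.1 ++ [p.2], st.2.2))
    else st

-- A's second pass with the (unreachable) skip branch removed
def gN : (Option String × (List (List (String × String))) × Option String) →
    Int × List (String × String) →
    (Option String × (List (List (String × String))) × Option String) :=
  fun st p =>
    if dget p.2 "role" = some "system" then (dget p.2 "content", st.2.1, st.2.2)
    else if dget p.2 "role" = some "user" ∨ dget p.2 "role" = some "assistant" then
      (st.1, st.2.1 ++ [p.2], st.2.2)
    else st

theorem A_unfold (msgs : List (List (String × String))) :
    extract_conversation msgs =
      (PySem.List.enumerate msgs 0).foldl
        (fA ((PySem.List.enumerate msgs 0).foldl fL none)) (none, [], none) := rfl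

theorem fold_fA_of_ne (l : List (Int × List (String × String))) (L : Int)
    (hL : ∀ p ∈ l, p.1 ≠ L) (st) :
    l.foldl (fA (some L)) st = l.foldl gN st := by
  apply PySem.List.foldl_congr_mem
  intro st p hp
  simp [fA, gN, hL p hp]

theorem noskip (l : List (Int × List (String × String))) (sys conv lu) :
    l.foldl gN (sys, conv, lu) =
      (lastSysUpd sys (l.map (·.2)), conv ++ (l.map (·.2)).filter isUA, lu) := by
  induction l generalizing sys conv with
  | nil => simp [lastSysUpd]
  | cons a t ih =>
    by_cases h1 : dget a.2 "role" = some "system"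
    · have hf : isUA a.2 = false := by simp [isUA, isUser, isAsst, h1]
      simp [gN, h1, ih, lastSysUpd, isSys, contentOf, hf]
    · by_cases h2 : dget a.2 "role" = some "user" ∨ dget a.2 "role" = some "assistant"
      · have hf : isUA a.2 = true := by
          rcases h2 with h | h <;> simp [isUA, isUser, isAsst, h]
        simp [gN, h1, h2, ih, lastSysUpd, isSys, hf]
      · have hf : isUA a.2 = false := by
          push_neg at h2
          simp [isUA, isUser, isAsst, h2.1, h2.2]
        simp [gN, h1, h2, ih, lastSysUpd, isSys, hf]

theorem lui_append (ms : List (List (String × String))) (m : List (String × String)) :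
    (PySem.List.enumerate (ms ++ [m]) 0).foldl fL none =
      if dget m "role" = some "user" then some (ms.length : Int)
      else (PySem.List.enumerate ms 0).foldl fL none := by
  rw [PySem.List.enumerate_append]
  simp [PySem.List.enumerate_cons, PySem.List.enumerate_nil, List.foldl_append, fL]

theorem A_eq_spec (msgs : List (List (String × String))) :
    extract_conversation msgs = (sysSpec msgs, convSpec msgs, luSpec msgs) := by
  induction msgs using List.reverseRecOn with
  | nil => decide
  | append_singleton ms m ih =>
    rw [A_unfold, lui_append, PySem.List.enumerate_append]
    by_cases hu : dget m "role" = some "user"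
    · rw [if_pos hu, List.foldl_append]
      have hne : ∀ p ∈ PySem.List.enumerate ms 0, p.1 ≠ (ms.length : Int) := by
        intro p hp
        rcases (PySem.List.mem_enumerate_iff _ _ _).1 hp with ⟨k, hk, rfl⟩
        simp
        omega
      have hstep : ∀ st : Option String × (List (List (String × String))) × Option String,
          (PySem.List.enumerate [m] (0 + (ms.length : Int))).foldl (fA (some (ms.length : Int))) st
            = (st.1, st.2.1, dget m "content") := by
        intro st
        have hns : ¬ dget m "role" = some "system" := by rw [hu]; decide
        simp [PySem.List.enumerate_cons, PySem.List.enumerate_nil, fA, hu, hns]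
      rw [hstep, fold_fA_of_ne (PySem.List.enumerate ms 0) _ hne, noskip,
        PySem.List.map_snd_enumerate]
      have hnsys : isSys m = false := by simp [isSys, hu]
      have husr : isUser m = true := by simp [isUser, hu]
      rw [lastSysUpd_eq]
      simp [sysSpec, convSpec, luSpec, List.find?_cons, hnsys, husr, convRev, convRev_true,
        List.filter_reverse, Option.bind]
      cases h : (List.find? isSys ms.reverse) <;> simp [h, contentOf]
    · rw [if_neg hu, List.foldl_append, ← A_unfold, ih]
      have husr : isUser m = false := by simp [isUser, hu]
      by_cases hs : dget m "role" = some "system"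
      · have hsys : isSys m = true := by simp [isSys, hs]
        have hnasst : isAsst m = false := by simp [isAsst, hs]
        simp [PySem.List.enumerate_cons, PySem.List.enumerate_nil, fA, hs,
          sysSpec, convSpec, luSpec, List.find?_cons, hsys, husr, hnasst, convRev, contentOf]
      · by_cases ha : dget m "role" = some "assistant"
        · have hasst : isAsst m = true := by simp [isAsst, ha]
          have hnsys : isSys m = false := by simp [isSys, hs]
          simp [PySem.List.enumerate_cons, PySem.List.enumerate_nil, fA, hs, hu, ha,
            sysSpec, convSpec, luSpec, List.find?_cons, hnsys, husr, hasst, convRev]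
        · have hnsys : isSys m = false := by simp [isSys, hs]
          have hnasst : isAsst m = false := by simp [isAsst, ha]
          simp [PySem.List.enumerate_cons, PySem.List.enumerate_nil, fA, hs, hu, ha,
            sysSpec, convSpec, luSpec, List.find?_cons, hnsys, husr, hnasst, convRev]

theorem B_fold (l : List (List (String × String)))
    (sys : Option String) (ss : Bool) (conv : List (List (String × String)))
    (su : Bool) (lu : Option String) :
    l.foldl
      (fun (st : Option String × Bool × (List (List (String × String))) × Bool × Option String) msg =>
        let (sys, seenSys, conv, seenUser, lu) := st
        let role := dget msg "role"
        if role = some "system" then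
          (if seenSys then (sys, seenSys, conv, seenUser, lu)
           else (dget msg "content", true, conv, seenUser, lu))
        else if role = some "user" then
          (if seenUser then (sys, seenSys, conv ++ [msg], seenUser, lu)
           else (sys, seenSys, conv, true, dget msg "content"))
        else if role = some "assistant" then (sys, seenSys, conv ++ [msg], seenUser, lu)
        else (sys, seenSys, conv, seenUser, lu))
      (sys, ss, conv, su, lu) =
    ((if ss then sys else ((l.find? isSys).map contentOf).getD sys),
     ss || l.any isSys,
     conv ++ convRev su l,
     su || l.any isUser,
     (if su then lu else ((l.find? isUser).map contentOf).getD lu)) := by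
  induction l generalizing sys ss conv su lu with
  | nil => cases ss <;> cases su <;> simp [convRev]
  | cons a t ih =>
    by_cases h1 : dget a "role" = some "system"
    · have hsys : isSys a = true := by simp [isSys, h1]
      have husr : isUser a = false := by simp [isUser, h1]
      have hnasst : isAsst a = false := by simp [isAsst, h1]
      cases ss <;>
        simp [h1, ih, List.find?_cons, List.any_cons, hsys, husr, hnasst, convRev, contentOf]
    · have hnsys : isSys a = false := by simp [isSys, h1]
      by_cases h2 : dget a "role" = some "user"
      · have husr : isUser a = true := by simp [isUser, h2]
        cases su <;>
          simp [h1, h2, ih, List.find?_cons, List.any_cons, hnsys, husr, convRev, contentOf]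
      · have hnusr : isUser a = false := by simp [isUser, h2]
        by_cases h3 : dget a "role" = some "assistant"
        · have hasst : isAsst a = true := by simp [isAsst, h3]
          simp [h1, h2, h3, ih, List.find?_cons, List.any_cons, hnsys, hnusr, hasst, convRev]
        · have hnasst : isAsst a = false := by simp [isAsst, h3]
          simp [h1, h2, h3, ih, List.find?_cons, List.any_cons, hnsys, hnusr, hnasst, convRev]

theorem B_eq_spec (msgs : List (List (String × String))) :
    extract_conversation_alt msgs = (sysSpec msgs, convSpec msgs, luSpec msgs) := by
  rw [extract_conversation_alt, B_fold]
  simp only [sysSpec, convSpec, luSpec, Bool.false_or, if_neg Bool.false_ne_true,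
    List.nil_append]
  cases h1 : (List.find? isSys msgs.reverse) <;> cases h2 : (List.find? isUser msgs.reverse) <;>
    simp [h1, h2, Option.bind]

-- ===== VERDICT (by name: the statement is the Claim_ definition above) =====
theorem extract_conversation_spec : Claim_equal_extract_conversation := by
  intro msgs _
  unfold Spec_extract_conversation
  rw [A_eq_spec, B_eq_spec]
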